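-- pv_equiv track=rewrite | github.com/aczepiec/Simpleks | simpleks.py | getPivotColumnIndex
-- ===== SOURCE A (Python) =====
-- def getPivotColumnIndex(c_z,mini):
--     pivot_index = 0
--     for i, val in enumerate(c_z):
--         if mini:
--             if val<c_z[pivot_index]:
--                 pivot_index=i
--         elif(val>c_z[pivot_index]):
--             pivot_index=i
--     return pivot_index
-- ===== SOURCE B (Python) =====
-- def getPivotColumnIndex(c_z, mini):
--     if not c_z:
--         return 0
--     target = min(c_z) if mini else max(c_z)
--     return c_z.index(target)
-- ===== Notes on version B (the rewrite author's own statement) =====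
-- stated objective: simpler
-- what changed: Replaces the index-tracking comparison loop (which re-reads c_z[pivot_index] each step) by computing the extreme value with min/max and locating its first occurrence with list.index, with an explicit empty-list guard returning 0 as A does.
import Mathlib
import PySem

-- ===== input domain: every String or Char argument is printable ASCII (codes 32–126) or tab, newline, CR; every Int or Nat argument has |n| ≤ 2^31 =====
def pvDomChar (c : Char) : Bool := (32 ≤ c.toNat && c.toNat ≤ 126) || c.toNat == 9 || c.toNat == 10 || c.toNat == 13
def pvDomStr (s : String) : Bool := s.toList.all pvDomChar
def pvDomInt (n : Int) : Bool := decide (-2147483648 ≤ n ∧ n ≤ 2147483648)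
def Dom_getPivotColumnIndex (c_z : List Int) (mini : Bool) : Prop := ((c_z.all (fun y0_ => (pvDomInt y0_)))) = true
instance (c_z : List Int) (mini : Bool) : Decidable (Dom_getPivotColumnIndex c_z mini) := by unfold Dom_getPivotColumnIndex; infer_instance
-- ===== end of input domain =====

-- B replaces A's index-tracking comparison loop by min/max plus first-occurrence list.index (objective: simpler).

-- ===== PORT A =====
-- the indexing c_z[pivot_index] is always in range while the loop runs (pivot_index starts at 0
-- on a nonempty list and is only ever set to a valid enumerate index), so pyGetD's default is never used
def getPivotColumnIndex (c_z : List Int) (mini : Bool) : Int :=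
  (PySem.List.enumerate c_z 0).foldl
    (fun pivot_index iv =>
      if mini then
        if iv.2 < PySem.List.pyGetD c_z pivot_index 0 then iv.1 else pivot_index
      else
        if PySem.List.pyGetD c_z pivot_index 0 < iv.2 then iv.1 else pivot_index)
    0

-- ===== PORT B =====
def getPivotColumnIndex_alt (c_z : List Int) (mini : Bool) : Int :=
  if c_z = [] then 0
  else
    let target : Int :=
      (if mini then PySem.List.min? c_z (fun x => x) else PySem.List.max? c_z (fun x => x)).getD 0
    (((PySem.List.index? c_z target).getD 0 : Nat) : Int)

-- ===== PRECONDITION & SPEC =====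
def Spec_getPivotColumnIndex (c_z : List Int) (mini : Bool) (out : Int) : Prop := out = getPivotColumnIndex_alt c_z mini
instance (c_z : List Int) (mini : Bool) (out : Int) : Decidable (Spec_getPivotColumnIndex c_z mini out) := by unfold Spec_getPivotColumnIndex; infer_instance

-- ===== CLAIM (what is proved, stated in full; the proofs are below) =====
def Claim_equal_getPivotColumnIndex : Prop := ∀ (c_z : List Int) (mini : Bool), Dom_getPivotColumnIndex c_z mini → Spec_getPivotColumnIndex c_z mini (getPivotColumnIndex c_z mini)

-- ===== LEMMAS AND PROOFS =====

-- pure mirror of A's loop for mini = true: v is the current pivot value, p the pivot index, k the next index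
def runMin (v p k : Int) : List Int → Int
  | [] => p
  | x :: xs => if x < v then runMin x k (k + 1) xs else runMin v p (k + 1) xs

-- pure mirror of A's loop for mini = false
def runMax (v p k : Int) : List Int → Int
  | [] => p
  | x :: xs => if v < x then runMax x k (k + 1) xs else runMax v p (k + 1) xs

-- structural minimum / maximum value of a list
def myMin : List Int → Option Int
  | [] => none
  | x :: xs => match myMin xs with | none => some x | some m => some (min x m)

def myMax : List Int → Option Int
  | [] => none
  | x :: xs => match myMax xs with | none => some x | some m => some (max x m)

lemma myMin_eq_none_iff (xs : List Int) : myMin xs = none ↔ xs = [] := by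
  cases xs with
  | nil => simp [myMin]
  | cons x xs => cases h : myMin xs <;> simp [myMin, h]

lemma myMax_eq_none_iff (xs : List Int) : myMax xs = none ↔ xs = [] := by
  cases xs with
  | nil => simp [myMax]
  | cons x xs => cases h : myMax xs <;> simp [myMax, h]

lemma myMin_mem : ∀ {xs : List Int} {m : Int}, myMin xs = some m → m ∈ xs := by
  intro xs
  induction xs with
  | nil => intro m h; simp [myMin] at h
  | cons x xs ih =>
    intro m h
    cases hxs : myMin xs with
    | none => simp [myMin, hxs] at h; simp [h]
    | some m' =>
      simp [myMin, hxs] at h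
      rcases le_total x m' with hle | hle
      · simp [min_eq_left hle] at h; simp [h]
      · rw [min_eq_right hle] at h
        exact List.mem_cons_of_mem _ (ih (h ▸ hxs))

lemma myMax_mem : ∀ {xs : List Int} {m : Int}, myMax xs = some m → m ∈ xs := by
  intro xs
  induction xs with
  | nil => intro m h; simp [myMax] at h
  | cons x xs ih =>
    intro m h
    cases hxs : myMax xs with
    | none => simp [myMax, hxs] at h; simp [h]
    | some m' =>
      simp [myMax, hxs] at h
      rcases le_total m' x with hle | hle
      · simp [max_eq_left hle] at h; simp [h]
      · rw [max_eq_right hle] at h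
        exact List.mem_cons_of_mem _ (ih (h ▸ hxs))

lemma myMin_isMin : ∀ {xs : List Int} {m : Int}, myMin xs = some m → ∀ y ∈ xs, m ≤ y := by
  intro xs
  induction xs with
  | nil => intro m h; simp [myMin] at h
  | cons x xs ih =>
    intro m h y hy
    cases hxs : myMin xs with
    | none =>
      rw [(myMin_eq_none_iff xs).mp hxs] at hy
      simp [myMin, hxs] at h
      simp at hy; omega
    | some m' =>
      simp [myMin, hxs] at h
      rcases List.mem_cons.mp hy with rfl | hy'
      · omega
      · have := ih hxs y hy'; omega

lemma myMax_isMax : ∀ {xs : List Int} {m : Int}, myMax xs = some m → ∀ y ∈ xs, y ≤ m := by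
  intro xs
  induction xs with
  | nil => intro m h; simp [myMax] at h
  | cons x xs ih =>
    intro m h y hy
    cases hxs : myMax xs with
    | none =>
      rw [(myMax_eq_none_iff xs).mp hxs] at hy
      simp [myMax, hxs] at h
      simp at hy; omega
    | some m' =>
      simp [myMax, hxs] at h
      rcases List.mem_cons.mp hy with rfl | hy'
      · omega
      · have := ih hxs y hy'; omega

lemma min?_eq_myMin (xs : List Int) : PySem.List.min? xs (fun x => x) = myMin xs := by
  cases h : PySem.List.min? xs (fun x => x) with
  | none =>
    have : xs = [] := (PySem.List.min?_eq_none_iff xs _).mp h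
    simp [this, myMin]
  | some m =>
    cases h' : myMin xs with
    | none =>
      have : xs = [] := (myMin_eq_none_iff xs).mp h'
      subst this
      exact absurd (PySem.List.min?_mem h) (by simp)
    | some m' =>
      have hmem := PySem.List.min?_mem h
      have hmin := PySem.List.min?_isMin h
      have hmem' := myMin_mem h'
      have hmin' := myMin_isMin h'
      have : m = m' := le_antisymm (hmin m' hmem') (hmin' m hmem)
      simp [this]

lemma max?_eq_myMax (xs : List Int) : PySem.List.max? xs (fun x => x) = myMax xs := by
  cases h : PySem.List.max? xs (fun x => x) with
  | none =>
    have : xs = [] := (PySem.List.max?_eq_none_iff xs _).mp h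
    simp [this, myMax]
  | some m =>
    cases h' : myMax xs with
    | none =>
      have : xs = [] := (myMax_eq_none_iff xs).mp h'
      subst this
      exact absurd (PySem.List.max?_mem h) (by simp)
    | some m' =>
      have hmem := PySem.List.max?_mem h
      have hmax := PySem.List.max?_isMax h
      have hmem' := myMax_mem h'
      have hmax' := myMax_isMax h'
      have : m = m' := le_antisymm (hmax' m hmem) (hmax m' hmem')
      simp [this]

lemma getD_map_add_one (o : Option Nat) (h : o.isSome) :
    ((o.map (· + 1)).getD 0 : Nat) = o.getD 0 + 1 := by
  cases o with
  | none => simp at h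
  | some k => simp

-- the index? value used below is always found (the searched value is a member)
lemma index?_cons_mem (x v : Int) (xs : List Int) (hne : x ≠ v) (hmem : v ∈ xs) :
    ((PySem.List.index? (x :: xs) v).getD 0 : Nat) = (PySem.List.index? xs v).getD 0 + 1 := by
  rw [PySem.List.index?_cons_of_ne _ hne]
  exact getD_map_add_one _ ((PySem.List.index?_isSome_iff xs v).mpr hmem)

-- A's loop (mini branch) computes: the start index plus the first index of the minimum,
-- when the minimum improves on the incoming pivot value v; otherwise the incoming pivot index p.
lemma run_min_char : ∀ (xs : List Int) (v p k m : Int), myMin xs = some m →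
    runMin v p k xs = if m < v then k + (((PySem.List.index? xs m).getD 0 : Nat) : Int) else p := by
  intro xs
  induction xs with
  | nil => intro v p k m h; simp [myMin] at h
  | cons x xs ih =>
    intro v p k m h
    cases hxs : myMin xs with
    | none =>
      have hnil : xs = [] := (myMin_eq_none_iff xs).mp hxs
      subst hnil
      simp [myMin] at h
      subst h
      by_cases hx : x < v
      · rw [if_pos hx, PySem.List.index?_cons_self]
        simp [runMin, hx]
      · rw [if_neg hx]
        simp [runMin, hx]
    | some m' =>
      simp [myMin, hxs] at h
      have hmem' : m' ∈ xs := myMin_mem hxs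
      by_cases hx : x < v
      · rw [show runMin v p k (x :: xs) = runMin x k (k + 1) xs from by simp [runMin, hx]]
        rw [ih x k (k + 1) m' hxs]
        by_cases hm' : m' < x
        · have hm : m = m' := by omega
          have hxne : x ≠ m' := by omega
          subst hm
          rw [if_pos (by omega : m < v)]
          rw [index?_cons_mem x m xs hxne hmem']
          simp [if_pos hm']; ring
        · have hm : m = x := by omega
          subst hm
          rw [if_pos (by omega : m < v), if_neg hm', PySem.List.index?_cons_self]
          simp
      · rw [show runMin v p k (x :: xs) = runMin v p (k + 1) xs from by simp [runMin, hx]]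
        rw [ih v p (k + 1) m' hxs]
        by_cases hm' : m' < v
        · have hm : m = m' := by omega
          have hxne : x ≠ m' := by omega
          subst hm
          rw [if_pos hm', if_pos (by omega : m < v)]
          rw [index?_cons_mem x m xs hxne hmem']
          push_cast
          ring
        · rw [if_neg hm', if_neg (by omega : ¬ m < v)]

lemma run_max_char : ∀ (xs : List Int) (v p k m : Int), myMax xs = some m →
    runMax v p k xs = if v < m then k + (((PySem.List.index? xs m).getD 0 : Nat) : Int) else p := by
  intro xs
  induction xs with
  | nil => intro v p k m h; simp [myMax] at h
  | cons x xs ih =>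
    intro v p k m h
    cases hxs : myMax xs with
    | none =>
      have hnil : xs = [] := (myMax_eq_none_iff xs).mp hxs
      subst hnil
      simp [myMax] at h
      subst h
      by_cases hx : v < x
      · rw [if_pos hx, PySem.List.index?_cons_self]
        simp [runMax, hx]
      · rw [if_neg hx]
        simp [runMax, hx]
    | some m' =>
      simp [myMax, hxs] at h
      have hmem' : m' ∈ xs := myMax_mem hxs
      by_cases hx : v < x
      · rw [show runMax v p k (x :: xs) = runMax x k (k + 1) xs from by simp [runMax, hx]]
        rw [ih x k (k + 1) m' hxs]
        by_cases hm' : x < m'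
        · have hm : m = m' := by omega
          have hxne : x ≠ m' := by omega
          subst hm
          rw [if_pos (by omega : v < m)]
          rw [index?_cons_mem x m xs hxne hmem']
          simp [if_pos hm']; ring
        · have hm : m = x := by omega
          subst hm
          rw [if_pos (by omega : v < m), if_neg hm', PySem.List.index?_cons_self]
          simp
      · rw [show runMax v p k (x :: xs) = runMax v p (k + 1) xs from by simp [runMax, hx]]
        rw [ih v p (k + 1) m' hxs]
        by_cases hm' : v < m'
        · have hm : m = m' := by omega
          have hxne : x ≠ m' := by omega
          subst hm
          rw [if_pos hm', if_pos (by omega : v < m)]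
          rw [index?_cons_mem x m xs hxne hmem']
          push_cast; ring
        · rw [if_neg hm', if_neg (by omega : ¬ v < m)]

-- A's fold over the enumerate suffix equals the pure mirror, given that v is the value at pivot p
-- and the suffix values agree with c_z at the enumerated indices
lemma bridgeMin (c_z : List Int) : ∀ (xs : List Int) (k p v : Int),
    PySem.List.pyGetD c_z p 0 = v →
    (∀ j : Nat, j < xs.length → PySem.List.pyGetD c_z (k + (j : Int)) 0 = xs[j]!) →
    (PySem.List.enumerate xs k).foldl
      (fun pivot_index iv =>
        if iv.2 < PySem.List.pyGetD c_z pivot_index 0 then iv.1 else pivot_index) p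
    = runMin v p k xs := by
  intro xs
  induction xs with
  | nil => intro k p v _ _; simp [runMin]
  | cons x xs ih =>
    intro k p v h1 h2
    rw [PySem.List.enumerate_cons, List.foldl_cons]
    have h2' : ∀ j : Nat, j < xs.length → PySem.List.pyGetD c_z ((k + 1) + (j : Int)) 0 = xs[j]! := by
      intro j hj
      have := h2 (j + 1) (by simpa using Nat.succ_lt_succ hj)
      push_cast at this
      rw [show k + ((j : Int) + 1) = (k + 1) + (j : Int) by ring] at this
      simpa using this
    have hk : PySem.List.pyGetD c_z k 0 = x := by
      have := h2 0 (by simp)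
      simpa using this
    by_cases hx : x < v
    · simp only [h1]
      rw [if_pos hx, ih (k + 1) k x hk h2']
      simp [runMin, hx]
    · simp only [h1]
      rw [if_neg hx, ih (k + 1) p v h1 h2']
      simp [runMin, hx]

lemma bridgeMax (c_z : List Int) : ∀ (xs : List Int) (k p v : Int),
    PySem.List.pyGetD c_z p 0 = v →
    (∀ j : Nat, j < xs.length → PySem.List.pyGetD c_z (k + (j : Int)) 0 = xs[j]!) →
    (PySem.List.enumerate xs k).foldl
      (fun pivot_index iv =>
        if PySem.List.pyGetD c_z pivot_index 0 < iv.2 then iv.1 else pivot_index) p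
    = runMax v p k xs := by
  intro xs
  induction xs with
  | nil => intro k p v _ _; simp [runMax]
  | cons x xs ih =>
    intro k p v h1 h2
    rw [PySem.List.enumerate_cons, List.foldl_cons]
    have h2' : ∀ j : Nat, j < xs.length → PySem.List.pyGetD c_z ((k + 1) + (j : Int)) 0 = xs[j]! := by
      intro j hj
      have := h2 (j + 1) (by simpa using Nat.succ_lt_succ hj)
      push_cast at this
      rw [show k + ((j : Int) + 1) = (k + 1) + (j : Int) by ring] at this
      simpa using this
    have hk : PySem.List.pyGetD c_z k 0 = x := by
      have := h2 0 (by simp)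
      simpa using this
    by_cases hx : v < x
    · simp only [h1]
      rw [if_pos hx, ih (k + 1) k x hk h2']
      simp [runMax, hx]
    · simp only [h1]
      rw [if_neg hx, ih (k + 1) p v h1 h2']
      simp [runMax, hx]

lemma self_lookup (c_z : List Int) :
    ∀ j : Nat, j < c_z.length → PySem.List.pyGetD c_z ((0 : Int) + (j : Int)) 0 = c_z[j]! := by
  intro j hj
  rw [zero_add, PySem.List.pyGetD_natCast]
  simp [List.getD_eq_getElem?_getD, List.getElem?_eq_getElem hj, List.getElem!_eq_getElem?_getD]

-- ===== VERDICT (by name: the statement is the Claim_ definition above) =====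
theorem getPivotColumnIndex_spec : Claim_equal_getPivotColumnIndex := by
  intro c_z mini _
  unfold Spec_getPivotColumnIndex
  cases c_z with
  | nil => cases mini <;> simp [getPivotColumnIndex, getPivotColumnIndex_alt]
  | cons y ys =>
    have hhead : PySem.List.pyGetD (y :: ys) (0 : Int) 0 = y := by
      simp [PySem.List.pyGetD_zero_cons]
    cases mini with
    | true =>
      obtain ⟨m, hm⟩ : ∃ m, myMin (y :: ys) = some m := by
        cases h : myMin (y :: ys) with
        | none => exact absurd ((myMin_eq_none_iff _).mp h) (by simp)
        | some m => exact ⟨m, rfl⟩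
      have hA : getPivotColumnIndex (y :: ys) true = runMin y 0 0 (y :: ys) := by
        unfold getPivotColumnIndex
        simp only [if_true]
        exact bridgeMin (y :: ys) (y :: ys) 0 0 y hhead (self_lookup (y :: ys))
      have hB : getPivotColumnIndex_alt (y :: ys) true
          = (((PySem.List.index? (y :: ys) m).getD 0 : Nat) : Int) := by
        simp [getPivotColumnIndex_alt, min?_eq_myMin, hm]
      rw [hA, hB, run_min_char (y :: ys) y 0 0 m hm]
      by_cases hlt : m < y
      · rw [if_pos hlt]; ring
      · rw [if_neg hlt]
        have hle : m ≤ y := myMin_isMin hm y (by simp)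
        have : m = y := by omega
        subst this
        rw [PySem.List.index?_cons_self]
        simp
    | false =>
      obtain ⟨m, hm⟩ : ∃ m, myMax (y :: ys) = some m := by
        cases h : myMax (y :: ys) with
        | none => exact absurd ((myMax_eq_none_iff _).mp h) (by simp)
        | some m => exact ⟨m, rfl⟩
      have hA : getPivotColumnIndex (y :: ys) false = runMax y 0 0 (y :: ys) := by
        unfold getPivotColumnIndex
        simp only [Bool.false_eq_true, if_false]
        exact bridgeMax (y :: ys) (y :: ys) 0 0 y hhead (self_lookup (y :: ys))
      have hB : getPivotColumnIndex_alt (y :: ys) false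
          = (((PySem.List.index? (y :: ys) m).getD 0 : Nat) : Int) := by
        simp [getPivotColumnIndex_alt, max?_eq_myMax, hm]
      rw [hA, hB, run_max_char (y :: ys) y 0 0 m hm]
      by_cases hlt : y < m
      · rw [if_pos hlt]; ring
      · rw [if_neg hlt]
        have hle : y ≤ m := myMax_isMax hm y (by simp)
        have : m = y := by omega
        subst this
        rw [PySem.List.index?_cons_self]
        simp
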